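-- pv_equiv track=rewrite | github.com/avishai987/SIR_modeling_with_GUI | SIR_modeling_write_to_file.py | next_cell
-- ===== SOURCE A (Python) =====
-- def next_cell(i, j, choice, row, col):  # find next cell when choice and matrix size is given
--     next_i = i
--     next_j = j
--
--     if (choice == "stay"):
--         next_i = i
--         next_j = j
--
--     if (choice == "left-up"):
--         next_i, next_j = next_cell(i, j, "left", row, col)
--         next_i, next_j = next_cell(next_i, next_j, "up", row, col)
--
--     if (choice == "left-down"):
--         next_i, next_j = next_cell(i, j, "left", row, col)
--         next_i, next_j = next_cell(next_i, next_j, "down", row, col)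
--
--     if (choice == "right-up"):
--         next_i, next_j = next_cell(i, j, "right", row, col)
--         next_i, next_j = next_cell(next_i, next_j, "up", row, col)
--
--     if (choice == "right-down"):
--         next_i, next_j = next_cell(i, j, "right", row, col)
--         next_i, next_j = next_cell(next_i, next_j, "down", row, col)
--
--     if (choice == "right"):
--         if (j == col - 1):  # edge
--             next_i = i
--             next_j = 0
--         else:
--             next_i = i
--             next_j = j + 1
--
--     if (choice == "down"):
--         if (i == row - 1):  # edge
--             next_i = 0
--             next_j = j
--         else:
--             next_i = i + 1
--             next_j = j
--
--     if (choice == "up"):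
--
--         if (i == 0): # edge
--             next_i = row - 1
--             next_j = j
--         else:
--             next_i = i - 1
--             next_j = j
--
--     if (choice == "left"):
--         next_i = i
--         next_j = j - 1
--
--         if (j == 0): # edge
--             next_i = i
--             next_j = col - 1
--
--     return [next_i, next_j]
-- ===== SOURCE B (Python) =====
-- # Table-driven: each choice maps to its list of unit moves; fold a single
-- # wraparound step over them (same edge arithmetic as A, horizontal first).
-- MOVES = {
--     "left": ["left"], "right": ["right"], "up": ["up"], "down": ["down"],
--     "left-up": ["left", "up"], "left-down": ["left", "down"],
--     "right-up": ["right", "up"], "right-down": ["right", "down"],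
-- }
--
-- def next_cell(i, j, choice, row, col):
--     for d in MOVES.get(choice, []):
--         if d == "right":
--             j = 0 if j == col - 1 else j + 1
--         elif d == "left":
--             j = col - 1 if j == 0 else j - 1
--         elif d == "up":
--             i = row - 1 if i == 0 else i - 1
--         else:  # down
--             i = 0 if i == row - 1 else i + 1
--     return [i, j]
-- ===== Notes on version B (the rewrite author's own statement) =====
-- stated objective: simpler
-- what changed: Replaces A's recursive nine-way if-chain with a table mapping each choice to its list of unit moves plus a single fold of one wraparound step.
import Mathlib
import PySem

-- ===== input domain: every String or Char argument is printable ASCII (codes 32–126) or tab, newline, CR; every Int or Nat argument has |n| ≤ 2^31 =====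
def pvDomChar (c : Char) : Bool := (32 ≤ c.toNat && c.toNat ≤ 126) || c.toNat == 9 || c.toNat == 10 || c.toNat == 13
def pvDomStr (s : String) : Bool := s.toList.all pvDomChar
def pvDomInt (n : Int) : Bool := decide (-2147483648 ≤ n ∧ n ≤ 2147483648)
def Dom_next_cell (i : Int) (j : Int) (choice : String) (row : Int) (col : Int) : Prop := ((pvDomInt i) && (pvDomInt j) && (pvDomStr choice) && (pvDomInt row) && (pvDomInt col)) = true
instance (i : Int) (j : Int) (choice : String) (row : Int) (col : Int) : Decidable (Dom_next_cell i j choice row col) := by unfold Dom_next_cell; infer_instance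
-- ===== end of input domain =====

-- B replaces A's recursive if-chain by a move table plus a fold of one wraparound step; objective: simpler.

-- ===== PORT A =====
-- Python's `next_i, next_j = next_cell(...)` unpacks the 2-element list; exact here since the port always returns 2 elements.
def pvUnpack2 (l : List Int) : Int × Int :=
  match l with
  | [a, b] => (a, b)
  | _ => (0, 0)

def next_cell (i : Int) (j : Int) (choice : String) (row : Int) (col : Int) : List Int :=
  let s0 : Int × Int := (i, j)
  let s1 := if choice = "stay" then (i, j) else s0
  let s2 := if _h : choice = "left-up" then
      let p := pvUnpack2 (next_cell i j "left" row col)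
      pvUnpack2 (next_cell p.1 p.2 "up" row col)
    else s1
  let s3 := if _h : choice = "left-down" then
      let p := pvUnpack2 (next_cell i j "left" row col)
      pvUnpack2 (next_cell p.1 p.2 "down" row col)
    else s2
  let s4 := if _h : choice = "right-up" then
      let p := pvUnpack2 (next_cell i j "right" row col)
      pvUnpack2 (next_cell p.1 p.2 "up" row col)
    else s3
  let s5 := if _h : choice = "right-down" then
      let p := pvUnpack2 (next_cell i j "right" row col)
      pvUnpack2 (next_cell p.1 p.2 "down" row col)
    else s4
  let s6 := if choice = "right" then (if j = col - 1 then (i, (0 : Int)) else (i, j + 1)) else s5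
  let s7 := if choice = "down" then (if i = row - 1 then ((0 : Int), j) else (i + 1, j)) else s6
  let s8 := if choice = "up" then (if i = 0 then (row - 1, j) else (i - 1, j)) else s7
  let s9 := if choice = "left" then (if j = 0 then (i, col - 1) else (i, j - 1)) else s8
  [s9.1, s9.2]
termination_by choice.length
decreasing_by all_goals (subst _h; decide)

-- ===== PORT B =====
def pvMoves : PySem.Dict String (List String) :=
  PySem.Dict.mk [("left", ["left"]), ("right", ["right"]), ("up", ["up"]), ("down", ["down"]),
    ("left-up", ["left", "up"]), ("left-down", ["left", "down"]),
    ("right-up", ["right", "up"]), ("right-down", ["right", "down"])]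

def pvStep (row : Int) (col : Int) (s : Int × Int) (d : String) : Int × Int :=
  if d = "right" then (s.1, if s.2 = col - 1 then 0 else s.2 + 1)
  else if d = "left" then (s.1, if s.2 = 0 then col - 1 else s.2 - 1)
  else if d = "up" then ((if s.1 = 0 then row - 1 else s.1 - 1), s.2)
  else ((if s.1 = row - 1 then 0 else s.1 + 1), s.2)

def next_cell_alt (i : Int) (j : Int) (choice : String) (row : Int) (col : Int) : List Int :=
  let s := (PySem.Dict.getD pvMoves choice []).foldl (pvStep row col) (i, j)
  [s.1, s.2]

-- ===== PRECONDITION & SPEC =====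
def Spec_next_cell (i : Int) (j : Int) (choice : String) (row : Int) (col : Int) (out : List Int) : Prop := out = next_cell_alt i j choice row col
instance (i : Int) (j : Int) (choice : String) (row : Int) (col : Int) (out : List Int) : Decidable (Spec_next_cell i j choice row col out) := by unfold Spec_next_cell; infer_instance

-- ===== CLAIM (what is proved, stated in full; the proofs are below) =====
def Claim_equal_next_cell : Prop := ∀ (i : Int) (j : Int) (choice : String) (row : Int) (col : Int), Dom_next_cell i j choice row col → Spec_next_cell i j choice row col (next_cell i j choice row col)

-- ===== LEMMAS AND PROOFS =====

-- ===== VERDICT (by name: the statement is the Claim_ definition above) =====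
theorem next_cell_spec : Claim_equal_next_cell := by
  intro i j choice row col _
  unfold Spec_next_cell
  by_cases h1 : choice = "stay"
  · subst h1
    simp [next_cell, next_cell_alt, pvMoves, PySem.Dict.getD_eq_get?_getD, PySem.Dict.get?]
  by_cases h2 : choice = "left-up"
  · subst h2
    simp [next_cell, next_cell_alt, pvMoves, pvStep, pvUnpack2,
      PySem.Dict.getD_eq_get?_getD, PySem.Dict.get?]
    split_ifs <;> simp_all
  by_cases h3 : choice = "left-down"
  · subst h3
    simp [next_cell, next_cell_alt, pvMoves, pvStep, pvUnpack2,
      PySem.Dict.getD_eq_get?_getD, PySem.Dict.get?]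
    split_ifs <;> simp_all
  by_cases h4 : choice = "right-up"
  · subst h4
    simp [next_cell, next_cell_alt, pvMoves, pvStep, pvUnpack2,
      PySem.Dict.getD_eq_get?_getD, PySem.Dict.get?]
    split_ifs <;> simp_all
  by_cases h5 : choice = "right-down"
  · subst h5
    simp [next_cell, next_cell_alt, pvMoves, pvStep, pvUnpack2,
      PySem.Dict.getD_eq_get?_getD, PySem.Dict.get?]
    split_ifs <;> simp_all
  by_cases h6 : choice = "right"
  · subst h6
    simp [next_cell, next_cell_alt, pvMoves, pvStep,
      PySem.Dict.getD_eq_get?_getD, PySem.Dict.get?]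
    split_ifs <;> simp_all
  by_cases h7 : choice = "down"
  · subst h7
    simp [next_cell, next_cell_alt, pvMoves, pvStep,
      PySem.Dict.getD_eq_get?_getD, PySem.Dict.get?]
    split_ifs <;> simp_all
  by_cases h8 : choice = "up"
  · subst h8
    simp [next_cell, next_cell_alt, pvMoves, pvStep,
      PySem.Dict.getD_eq_get?_getD, PySem.Dict.get?]
    split_ifs <;> simp_all
  by_cases h9 : choice = "left"
  · subst h9
    simp [next_cell, next_cell_alt, pvMoves, pvStep,
      PySem.Dict.getD_eq_get?_getD, PySem.Dict.get?]
    split_ifs <;> simp_all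
  · rw [next_cell]
    simp [next_cell_alt, pvMoves, PySem.Dict.getD_eq_get?_getD, PySem.Dict.get?,
      h1, h2, h3, h4, h5, h6, h7, h8, h9,
      Ne.symm h2, Ne.symm h3, Ne.symm h4, Ne.symm h5,
      Ne.symm h6, Ne.symm h7, Ne.symm h8, Ne.symm h9]
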